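-- pv_equiv track=rewrite | github.com/cirosantilli/project-euler-solutions | solvers/771.py | compute_finite_exception_maxes
-- ===== SOURCE A (Python) =====
-- from typing import List
--
-- def is_consecutive(seq: List[int]) -> bool:
--     return all(seq[i + 1] == seq[i] + 1 for i in range(len(seq) - 1))
--
-- def is_geometric(seq: List[int]) -> bool:
--     return all(seq[i + 1] * seq[0] == seq[i] * seq[1] for i in range(1, len(seq) - 1))
--
-- def is_rec(seq: List[int], m: int, s: int) -> bool:
--     return all(
--         seq[i + 1] == m * seq[i] + s * seq[i - 1] for i in range(1, len(seq) - 1)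
--     )
--
-- def in_families(seq: List[int]) -> bool:
--     if len(seq) < 3:
--         return False
--     if is_consecutive(seq) or is_geometric(seq):
--         return True
--     a0, a1, a2 = seq[0], seq[1], seq[2]
--     if (a2 - a0) % a1 == 0:
--         m = (a2 - a0) // a1
--         if m >= 1 and is_rec(seq, m, 1):
--             k = a1 * a1 - a0 * (m * a1 + a0)
--             if abs(k) <= 2:
--                 return True
--     if (a2 + a0) % a1 == 0:
--         m = (a2 + a0) // a1
--         if m >= 2 and is_rec(seq, m, -1):
--             k = a1 * a1 - a0 * (m * a1 - a0)
--             if abs(k) <= 2: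
--                 return True
--     return False
--
-- def compute_finite_exception_maxes(bound: int) -> List[int]:
--     starts = [(1, 2), (2, 3)]
--     found: List[List[int]] = []
--     for start in starts:
--         stack = [list(start)]
--         while stack:
--             seq = stack.pop()
--             if seq[-1] > bound:
--                 continue
--             if len(seq) >= 5 and not in_families(seq):
--                 found.append(seq)
--             a, b = seq[-2], seq[-1]
--             t = b * b
--             for k in (-2, -1, 0, 1, 2):
--                 num = t + k
--                 if num % a == 0:
--                     c = num // a
--                     if c > b and c <= bound and -2 <= t - a * c <= 2:
--                         stack.append(seq + [c])
--
--     # remove prefixes of the infinite exception path 1,2,6,18,54,...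
--     inf = [1, 2, 6]
--     while True:
--         nxt = inf[-1] * 3
--         if nxt > bound:
--             break
--         inf.append(nxt)
--     inf_prefixes = {tuple(inf[:i]) for i in range(5, len(inf) + 1)}
--     maxes = [seq[-1] for seq in found if tuple(seq) not in inf_prefixes]
--     maxes.sort()
--     return maxes
-- ===== SOURCE B (Python) =====
-- from typing import List
--
-- def _fam_branch(seq: List[int], s: int) -> bool:
--     # unified handler for both second-order families a[i+1] = m*a[i] + s*a[i-1], s in (1, -1)
--     a0, a1, a2 = seq[0], seq[1], seq[2]
--     num = a2 - s * a0
--     if num % a1 == 0: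
--         m = num // a1
--         if m >= (1 if s == 1 else 2):
--             if all(z == m * y + s * x for x, y, z in zip(seq, seq[1:], seq[2:])):
--                 return abs(a1 * a1 - a0 * (m * a1 + s * a0)) <= 2
--     return False
--
-- def _in_fams(seq: List[int]) -> bool:
--     if len(seq) < 3:
--         return False
--     if all(y == x + 1 for x, y in zip(seq, seq[1:])):
--         return True
--     if all(z * seq[0] == y * seq[1] for y, z in zip(seq[1:], seq[2:])):
--         return True
--     return any(_fam_branch(seq, s) for s in (1, -1))
--
-- def compute_finite_exception_maxes(bound: int) -> List[int]:
--     # recursive DFS returning the list of hits below each start; no explicit stack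
--     def dfs(seq: List[int]) -> List[List[int]]:
--         a, b = seq[-2], seq[-1]
--         if b > bound:
--             return []
--         hits = [seq] if len(seq) >= 5 and not _in_fams(seq) else []
--         t = b * b
--         for k in (-2, -1, 0, 1, 2):
--             if (t + k) % a == 0:
--                 c = (t + k) // a
--                 if c > b and c <= bound and -2 <= t - a * c <= 2:
--                     hits += dfs(seq + [c])
--         return hits
--
--     found = dfs([1, 2]) + dfs([2, 3])
--
--     # infinite exception path 1,2,6,18,54,...: drop its prefixes by direct comparison
--     inf = [1, 2]
--     p = 6
--     while p <= bound:
--         inf.append(p)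
--         p *= 3
--     return sorted(
--         s[-1] for s in found if not (len(s) <= len(inf) and s == inf[: len(s)])
--     )
-- ===== Notes on version B (the rewrite author's own statement) =====
-- stated objective: alternative
-- what changed: A's explicit LIFO-stack depth-first loop is replaced by a recursive dfs that returns the list of hits below each start (safe because the output is sorted, so visit order is irrelevant); A's two hand-written recurrence-family branches are merged into one parametrised check over s in (1,-1) written with zips over adjacent pairs/triples instead of index ranges; and A's set-of-tuple-prefixes filter for the infinite tripling path is replaced by a direct prefix comparison seq == inf[:len(seq)].
import Mathlib
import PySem

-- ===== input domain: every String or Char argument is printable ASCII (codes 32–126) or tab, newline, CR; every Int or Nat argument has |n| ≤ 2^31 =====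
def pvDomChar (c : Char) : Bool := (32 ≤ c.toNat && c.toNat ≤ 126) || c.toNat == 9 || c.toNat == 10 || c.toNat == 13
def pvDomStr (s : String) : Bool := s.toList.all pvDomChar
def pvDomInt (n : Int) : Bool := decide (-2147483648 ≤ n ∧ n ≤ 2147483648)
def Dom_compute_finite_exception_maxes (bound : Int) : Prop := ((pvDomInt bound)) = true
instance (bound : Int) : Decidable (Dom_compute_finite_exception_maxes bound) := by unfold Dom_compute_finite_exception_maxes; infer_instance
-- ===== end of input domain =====

-- B replaces A's LIFO-stack depth-first loop by a recursive dfs returning the hits below each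
-- start, merges A's two hand-written recurrence-family branches into one parametrised check
-- written with zips instead of index ranges, and replaces A's set of tuple prefixes of the
-- infinite path by a direct prefix comparison.  Same values: the output is sorted, so the
-- different visit order of the search tree is irrelevant.

-- ===== PORT A =====
def is_consecutive (seq : List Int) : Bool :=
  (PySem.List.pyRange 0 ((seq.length : Int) - 1) 1).all
    (fun i => PySem.List.pyGetD seq (i + 1) 0 == PySem.List.pyGetD seq i 0 + 1)

def is_geometric (seq : List Int) : Bool :=
  (PySem.List.pyRange 1 ((seq.length : Int) - 1) 1).all
    (fun i => PySem.List.pyGetD seq (i + 1) 0 * PySem.List.pyGetD seq 0 0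
      == PySem.List.pyGetD seq i 0 * PySem.List.pyGetD seq 1 0)

def is_rec (seq : List Int) (m s : Int) : Bool :=
  (PySem.List.pyRange 1 ((seq.length : Int) - 1) 1).all
    (fun i => PySem.List.pyGetD seq (i + 1) 0
      == m * PySem.List.pyGetD seq i 0 + s * PySem.List.pyGetD seq (i - 1) 0)

def in_families (seq : List Int) : Bool :=
  if seq.length < 3 then false
  else if is_consecutive seq || is_geometric seq then true
  else
    let a0 := PySem.List.pyGetD seq 0 0
    let a1 := PySem.List.pyGetD seq 1 0
    let a2 := PySem.List.pyGetD seq 2 0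
    let fam1 : Bool :=
      if PySem.Int.mod (a2 - a0) a1 == 0 then
        let m := PySem.Int.floordiv (a2 - a0) a1
        if 1 ≤ m ∧ is_rec seq m 1 = true then
          let k := a1 * a1 - a0 * (m * a1 + a0)
          decide (|k| ≤ 2)
        else false
      else false
    if fam1 then true
    else if PySem.Int.mod (a2 + a0) a1 == 0 then
      let m := PySem.Int.floordiv (a2 + a0) a1
      if 2 ≤ m ∧ is_rec seq m (-1) = true then
        let k := a1 * a1 - a0 * (m * a1 - a0)
        decide (|k| ≤ 2)
      else false
    else false

-- the body of A's 'for k in …' loop: the candidate extension seq + [c] for one k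
def pvChild (bound : Int) (seq : List Int) (k : Int) : Option (List Int) :=
  let a := PySem.List.pyGetD seq (-2) 0
  let b := PySem.List.pyGetD seq (-1) 0
  let t := b * b
  let num := t + k
  if PySem.Int.mod num a == 0 then
    let c := PySem.Int.floordiv num a
    if b < c ∧ c ≤ bound ∧ -2 ≤ t - a * c ∧ t - a * c ≤ 2 then some (seq ++ [c]) else none
  else none

-- the candidates A pushes, produced for k = -2,-1,0,1,2 in that order
def pvChildrenA (bound : Int) (seq : List Int) : List (List Int) :=
  ([-2, -1, 0, 1, 2] : List Int).filterMap (pvChild bound seq)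

-- termination measure for the search loops/recursions (proof artefact, not part of either algorithm)
def pvMez (bound : Int) (seq : List Int) : Nat :=
  6 ^ ((bound - PySem.List.pyGetD seq (-1) 0).toNat + 1)

theorem pvChild_last {bound : Int} {seq x : List Int} {k : Int}
    (h : pvChild bound seq k = some x) :
    PySem.List.pyGetD seq (-1) 0 < PySem.List.pyGetD x (-1) 0 ∧
      PySem.List.pyGetD x (-1) 0 ≤ bound := by
  simp only [pvChild] at h
  split at h
  · split at h
    · rename_i hc
      simp only [Option.some.injEq] at h
      subst h
      rw [PySem.List.pyGetD_neg_one_append_singleton]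
      exact ⟨hc.1, hc.2.1⟩
    · exact absurd h (by simp)
  · exact absurd h (by simp)

theorem pvMez_children {bound : Int} {seq x : List Int}
    (hx : x ∈ pvChildrenA bound seq) (hb : PySem.List.pyGetD seq (-1) 0 ≤ bound) :
    pvMez bound x ≤ 6 ^ (bound - PySem.List.pyGetD seq (-1) 0).toNat := by
  obtain ⟨k, -, hk⟩ := List.mem_filterMap.mp hx
  obtain ⟨h1, h2⟩ := pvChild_last hk
  unfold pvMez
  exact Nat.pow_le_pow_right (by omega) (by omega)

theorem pvChildrenA_len (bound : Int) (seq : List Int) : (pvChildrenA bound seq).length ≤ 5 := by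
  calc (pvChildrenA bound seq).length ≤ ([-2, -1, 0, 1, 2] : List Int).length :=
        List.length_filterMap_le _ _
    _ = 5 := rfl

theorem pvChildrenA_sum_lt (bound : Int) (seq : List Int)
    (hb : ¬ bound < PySem.List.pyGetD seq (-1) 0) :
    ((pvChildrenA bound seq).map (pvMez bound)).sum < pvMez bound seq := by
  have h1 := List.sum_le_card_nsmul ((pvChildrenA bound seq).map (pvMez bound))
      (6 ^ (bound - PySem.List.pyGetD seq (-1) 0).toNat) ?_
  · have h2 := pvChildrenA_len bound seq
    have h3 : pvMez bound seq = 6 * 6 ^ (bound - PySem.List.pyGetD seq (-1) 0).toNat := by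
      unfold pvMez; ring
    have h4 : 0 < 6 ^ (bound - PySem.List.pyGetD seq (-1) 0).toNat :=
      pow_pos (by norm_num) _
    simp only [List.length_map, smul_eq_mul] at h1
    nlinarith [h1, h2, h3, h4]
  · intro x hx
    obtain ⟨y, hy, rfl⟩ := List.mem_map.mp hx
    exact pvMez_children hy (by omega)

-- A's 'while stack:' loop (stack head = top; state = (stack, found))
def pvLoopA (bound : Int) : List (List Int) → List (List Int) → List (List Int)
  | [], found => found
  | seq :: rest, found =>
    if bound < PySem.List.pyGetD seq (-1) 0 then pvLoopA bound rest found
    else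
      let found' := if 5 ≤ seq.length ∧ in_families seq = false then found ++ [seq] else found
      pvLoopA bound ((pvChildrenA bound seq).foldl (fun st x => x :: st) rest) found'
termination_by st _ => (st.map (pvMez bound)).sum
decreasing_by
  · have : 0 < pvMez bound seq := pow_pos (by norm_num) _
    simp only [List.map_cons, List.sum_cons]
    omega
  · rw [List.foldl_flip_cons_eq_append']
    have := pvChildrenA_sum_lt bound seq (by assumption)
    simp only [List.map_append, List.map_cons, List.sum_append, List.sum_cons, List.map_reverse,
      List.sum_reverse]
    omega

-- A's 'while True: nxt = inf[-1]*3 …' loop extending the initial triple;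
-- the '0 < last' conjunct only makes the recursion total: last starts at 6 and triples
def pvInfTail (bound last : Int) : List Int :=
  if h : 0 < last ∧ last * 3 ≤ bound then last * 3 :: pvInfTail bound (last * 3) else []
termination_by (bound - last).toNat
decreasing_by omega

def pvInf (bound : Int) : List Int := 1 :: 2 :: 6 :: pvInfTail bound 6

def compute_finite_exception_maxes (bound : Int) : List Int :=
  let found := pvLoopA bound [[2, 3]] (pvLoopA bound [[1, 2]] [])
  let inf := pvInf bound
  let infPrefixes : PySem.Set (List Int) :=
    PySem.Set.ofList ((PySem.List.pyRange 5 ((inf.length : Int) + 1) 1).map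
      (fun i => PySem.List.slice inf none (some i)))
  let maxes := (found.filter (fun s => !(PySem.Set.contains infPrefixes s))).map
    (fun s => PySem.List.pyGetD s (-1) 0)
  PySem.List.sorted maxes (fun x => x) false

-- ===== PORT B =====
-- B's unified family branch: a[i+1] = m*a[i] + s*a[i-1] for s = 1 or -1, checked with a zip
def pvFamBranch (seq : List Int) (s : Int) : Bool :=
  let a0 := PySem.List.pyGetD seq 0 0
  let a1 := PySem.List.pyGetD seq 1 0
  let a2 := PySem.List.pyGetD seq 2 0
  let num := a2 - s * a0
  if PySem.Int.mod num a1 == 0 then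
    let m := PySem.Int.floordiv num a1
    if (if s == 1 then 1 else 2) ≤ m then
      if ((seq.zip seq.tail).zip (seq.drop 2)).all
          (fun p => p.2 == m * p.1.2 + s * p.1.1) then
        decide (|a1 * a1 - a0 * (m * a1 + s * a0)| ≤ 2)
      else false
    else false
  else false

def pvInFams (seq : List Int) : Bool :=
  if seq.length < 3 then false
  else if (seq.zip seq.tail).all (fun p => p.2 == p.1 + 1) then true
  else if (seq.tail.zip (seq.drop 2)).all
      (fun p => p.2 * PySem.List.pyGetD seq 0 0 == p.1 * PySem.List.pyGetD seq 1 0) then true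
  else ([1, -1] : List Int).any (fun s => pvFamBranch seq s)

-- B's candidate children (the body of its 'for k in …' loop, inline)
def pvKidsB (bound : Int) (seq : List Int) : List (List Int) :=
  let a := PySem.List.pyGetD seq (-2) 0
  let b := PySem.List.pyGetD seq (-1) 0
  let t := b * b
  ([-2, -1, 0, 1, 2] : List Int).filterMap (fun k =>
    if PySem.Int.mod (t + k) a == 0 then
      let c := PySem.Int.floordiv (t + k) a
      if b < c ∧ c ≤ bound ∧ -2 ≤ t - a * c ∧ t - a * c ≤ 2 then some (seq ++ [c]) else none
    else none)

-- B's recursive dfs: the list of hits in the subtree rooted at seq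
def pvDfsB (bound : Int) (seq : List Int) : List (List Int) :=
  if bound < PySem.List.pyGetD seq (-1) 0 then []
  else
    (if 5 ≤ seq.length ∧ pvInFams seq = false then [seq] else []) ++
      (pvKidsB bound seq).attach.flatMap (fun x => pvDfsB bound x.1)
termination_by (bound - PySem.List.pyGetD seq (-1) 0).toNat
decreasing_by
  have hx := x.2
  simp only [pvKidsB] at hx
  obtain ⟨k, -, hk⟩ := List.mem_filterMap.mp hx
  obtain ⟨h1, h2⟩ := pvChild_last hk
  omega

-- B's 'p = 6; while p <= bound: inf.append(p); p *= 3' loop (the appended suffix)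
def pvInfB (bound p : Int) : List Int :=
  if h : 0 < p ∧ p ≤ bound then p :: pvInfB bound (p * 3) else []
termination_by (bound + 1 - p).toNat
decreasing_by omega

def compute_finite_exception_maxes_alt (bound : Int) : List Int :=
  let found := pvDfsB bound [1, 2] ++ pvDfsB bound [2, 3]
  let inf : List Int := 1 :: 2 :: pvInfB bound 6
  PySem.List.sorted
    ((found.filter (fun s =>
        !(decide (s.length ≤ inf.length) &&
          (s == PySem.List.slice inf none (some (s.length : Int)))))).map
      (fun s => PySem.List.pyGetD s (-1) 0))
    (fun x => x) false

-- ===== PRECONDITION & SPEC =====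
def Spec_compute_finite_exception_maxes (bound : Int) (out : List Int) : Prop := out = compute_finite_exception_maxes_alt bound
instance (bound : Int) (out : List Int) : Decidable (Spec_compute_finite_exception_maxes bound out) := by unfold Spec_compute_finite_exception_maxes; infer_instance

-- ===== CLAIM (what is proved, stated in full; the proofs are below) =====
def Claim_equal_compute_finite_exception_maxes : Prop := ∀ (bound : Int), Dom_compute_finite_exception_maxes bound → Spec_compute_finite_exception_maxes bound (compute_finite_exception_maxes bound)

-- ===== LEMMAS AND PROOFS =====

-- zip-over-adjacent-pairs (offset a) equals A's index-range formulation
theorem pv_pair (seq : List Int) (a : Nat) (f : Int → Int → Bool) :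
    ((seq.drop a).zip (seq.drop (a + 1))).all (fun p => f p.1 p.2)
      = (PySem.List.pyRange (a : Int) ((seq.length : Int) - 1) 1).all
          (fun i => f (PySem.List.pyGetD seq i 0) (PySem.List.pyGetD seq (i + 1) 0)) := by
  rw [Bool.eq_iff_iff]
  simp only [List.all_eq_true]
  constructor
  · intro h i hi
    rw [PySem.List.mem_pyRange_one] at hi
    rw [PySem.List.pyGetD_eq_getElem seq (0 : Int) (show (0 : Int) ≤ i from by omega) (by omega),
        PySem.List.pyGetD_eq_getElem seq (0 : Int) (show (0 : Int) ≤ i + 1 from by omega)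
          (by omega)]
    have ht : (i + 1).toNat = i.toNat + 1 := by omega
    simp only [ht]
    have hm : (seq[i.toNat]'(by omega), seq[i.toNat + 1]'(by omega))
        ∈ (seq.drop a).zip (seq.drop (a + 1)) := by
      rw [List.mem_iff_getElem]
      refine ⟨i.toNat - a, by simp only [List.length_zip, List.length_drop]; omega, ?_⟩
      rw [List.getElem_zip, List.getElem_drop, List.getElem_drop]
      have e1 : a + (i.toNat - a) = i.toNat := by omega
      have e2 : a + 1 + (i.toNat - a) = i.toNat + 1 := by omega
      simp only [e1, e2]
    exact h _ hm
  · intro h p hp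
    rw [List.mem_iff_getElem] at hp
    obtain ⟨k, hk, rfl⟩ := hp
    rw [List.length_zip, List.length_drop, List.length_drop] at hk
    rw [List.getElem_zip, List.getElem_drop, List.getElem_drop]
    have := h ((a + k : Nat) : Int) (by rw [PySem.List.mem_pyRange_one]; omega)
    rw [show (((a + k : Nat) : Int) + 1) = ((a + k + 1 : Nat) : Int) by push_cast; ring] at this
    simp only [PySem.List.pyGetD_natCast] at this
    rw [List.getD_eq_getElem _ _ (by omega), List.getD_eq_getElem _ _ (by omega)] at this
    have e2 : a + 1 + k = a + k + 1 := by omega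
    simp only [e2]
    exact this

-- zip-over-adjacent-triples equals A's index-range formulation
theorem pv_triple (seq : List Int) (f : Int → Int → Int → Bool) :
    (((seq.zip seq.tail).zip (seq.drop 2)).all (fun p => f p.1.1 p.1.2 p.2))
      = (PySem.List.pyRange 1 ((seq.length : Int) - 1) 1).all
          (fun i => f (PySem.List.pyGetD seq (i - 1) 0) (PySem.List.pyGetD seq i 0)
            (PySem.List.pyGetD seq (i + 1) 0)) := by
  rw [Bool.eq_iff_iff]
  simp only [List.all_eq_true]
  constructor
  · intro h i hi
    rw [PySem.List.mem_pyRange_one] at hi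
    rw [PySem.List.pyGetD_eq_getElem seq (0 : Int) (show (0 : Int) ≤ i - 1 from by omega)
          (by omega),
        PySem.List.pyGetD_eq_getElem seq (0 : Int) (show (0 : Int) ≤ i from by omega) (by omega),
        PySem.List.pyGetD_eq_getElem seq (0 : Int) (show (0 : Int) ≤ i + 1 from by omega)
          (by omega)]
    have h1 : (i - 1).toNat = i.toNat - 1 := by omega
    have h2 : (i + 1).toNat = i.toNat + 1 := by omega
    simp only [h1, h2]
    have hm : ((seq[i.toNat - 1]'(by omega), seq[i.toNat]'(by omega)), seq[i.toNat + 1]'(by omega))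
        ∈ (seq.zip seq.tail).zip (seq.drop 2) := by
      rw [List.mem_iff_getElem]
      refine ⟨i.toNat - 1,
        by simp only [List.length_zip, List.length_tail, List.length_drop]; omega, ?_⟩
      rw [List.getElem_zip, List.getElem_zip, List.getElem_tail, List.getElem_drop]
      have e1 : i.toNat - 1 + 1 = i.toNat := by omega
      have e2 : 2 + (i.toNat - 1) = i.toNat + 1 := by omega
      simp only [e1, e2]
    exact h _ hm
  · intro h p hp
    rw [List.mem_iff_getElem] at hp
    obtain ⟨k, hk, rfl⟩ := hp
    rw [List.length_zip, List.length_zip, List.length_tail, List.length_drop] at hk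
    rw [List.getElem_zip, List.getElem_zip, List.getElem_tail, List.getElem_drop]
    have := h ((k + 1 : Nat) : Int) (by rw [PySem.List.mem_pyRange_one]; omega)
    rw [show (((k + 1 : Nat) : Int) - 1) = ((k : Nat) : Int) by push_cast; ring,
        show (((k + 1 : Nat) : Int) + 1) = ((k + 2 : Nat) : Int) by push_cast; ring] at this
    simp only [PySem.List.pyGetD_natCast] at this
    rw [List.getD_eq_getElem _ _ (by omega), List.getD_eq_getElem _ _ (by omega),
        List.getD_eq_getElem _ _ (by omega)] at this
    have e2 : 2 + k = k + 2 := by omega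
    simp only [e2]
    exact this

-- B's family check agrees with A's pointwise
theorem pvFamBranch_one (seq : List Int) :
    pvFamBranch seq 1
      = (if PySem.Int.mod (PySem.List.pyGetD seq 2 0 - PySem.List.pyGetD seq 0 0)
            (PySem.List.pyGetD seq 1 0) == 0 then
          (if 1 ≤ PySem.Int.floordiv (PySem.List.pyGetD seq 2 0 - PySem.List.pyGetD seq 0 0)
                (PySem.List.pyGetD seq 1 0) ∧
              is_rec seq (PySem.Int.floordiv (PySem.List.pyGetD seq 2 0 - PySem.List.pyGetD seq 0 0)
                (PySem.List.pyGetD seq 1 0)) 1 = true then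
            decide (|PySem.List.pyGetD seq 1 0 * PySem.List.pyGetD seq 1 0 -
              PySem.List.pyGetD seq 0 0 *
                (PySem.Int.floordiv (PySem.List.pyGetD seq 2 0 - PySem.List.pyGetD seq 0 0)
                  (PySem.List.pyGetD seq 1 0) * PySem.List.pyGetD seq 1 0 +
                  PySem.List.pyGetD seq 0 0)| ≤ 2)
          else false)
        else false) := by
  simp only [pvFamBranch]
  set a0 := PySem.List.pyGetD seq 0 0 with ha0
  set a1 := PySem.List.pyGetD seq 1 0 with ha1
  set a2 := PySem.List.pyGetD seq 2 0 with ha2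
  rw [show a2 - 1 * a0 = a2 - a0 from by ring]
  by_cases hmod : (PySem.Int.mod (a2 - a0) a1 == 0) = true
  · rw [if_pos hmod, if_pos hmod]
    set m := PySem.Int.floordiv (a2 - a0) a1 with hm
    rw [show (if ((1 : Int) == 1) = true then (1 : Int) else 2) = 1 from by decide]
    have hrec : (((seq.zip seq.tail).zip (seq.drop 2)).all
        (fun p => p.2 == m * p.1.2 + 1 * p.1.1)) = is_rec seq m 1 := by
      rw [pv_triple seq (fun x y z => z == m * y + 1 * x)]
      rfl
    rw [hrec, show m * a1 + 1 * a0 = m * a1 + a0 from by ring]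
    by_cases h1 : (1 : Int) ≤ m
    · by_cases hr : is_rec seq m 1 = true
      · rw [if_pos h1, if_pos hr, if_pos ⟨h1, hr⟩]
      · rw [if_pos h1, if_neg hr, if_neg (by tauto)]
    · rw [if_neg h1, if_neg (by tauto)]
  · rw [if_neg hmod, if_neg hmod]

theorem pvFamBranch_negone (seq : List Int) :
    pvFamBranch seq (-1)
      = (if PySem.Int.mod (PySem.List.pyGetD seq 2 0 + PySem.List.pyGetD seq 0 0)
            (PySem.List.pyGetD seq 1 0) == 0 then
          (if 2 ≤ PySem.Int.floordiv (PySem.List.pyGetD seq 2 0 + PySem.List.pyGetD seq 0 0)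
                (PySem.List.pyGetD seq 1 0) ∧
              is_rec seq (PySem.Int.floordiv (PySem.List.pyGetD seq 2 0 + PySem.List.pyGetD seq 0 0)
                (PySem.List.pyGetD seq 1 0)) (-1) = true then
            decide (|PySem.List.pyGetD seq 1 0 * PySem.List.pyGetD seq 1 0 -
              PySem.List.pyGetD seq 0 0 *
                (PySem.Int.floordiv (PySem.List.pyGetD seq 2 0 + PySem.List.pyGetD seq 0 0)
                  (PySem.List.pyGetD seq 1 0) * PySem.List.pyGetD seq 1 0 -
                  PySem.List.pyGetD seq 0 0)| ≤ 2)
          else false)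
        else false) := by
  simp only [pvFamBranch]
  set a0 := PySem.List.pyGetD seq 0 0 with ha0
  set a1 := PySem.List.pyGetD seq 1 0 with ha1
  set a2 := PySem.List.pyGetD seq 2 0 with ha2
  rw [show a2 - -1 * a0 = a2 + a0 from by ring]
  by_cases hmod : (PySem.Int.mod (a2 + a0) a1 == 0) = true
  · rw [if_pos hmod, if_pos hmod]
    set m := PySem.Int.floordiv (a2 + a0) a1 with hm
    rw [show (if ((-1 : Int) == 1) = true then (1 : Int) else 2) = 2 from by decide]
    have hrec : (((seq.zip seq.tail).zip (seq.drop 2)).all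
        (fun p => p.2 == m * p.1.2 + -1 * p.1.1)) = is_rec seq m (-1) := by
      rw [pv_triple seq (fun x y z => z == m * y + -1 * x)]
      rfl
    rw [hrec, show m * a1 + -1 * a0 = m * a1 - a0 from by ring]
    by_cases h1 : (2 : Int) ≤ m
    · by_cases hr : is_rec seq m (-1) = true
      · rw [if_pos h1, if_pos hr, if_pos ⟨h1, hr⟩]
      · rw [if_pos h1, if_neg hr, if_neg (by tauto)]
    · rw [if_neg h1, if_neg (by tauto)]
  · rw [if_neg hmod, if_neg hmod]

theorem pvInFams_eq (seq : List Int) : pvInFams seq = in_families seq := by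
  by_cases hlen : seq.length < 3
  · simp only [pvInFams, in_families, if_pos hlen]
  · have hc : ((seq.zip seq.tail).all (fun p => p.2 == p.1 + 1)) = is_consecutive seq := by
      have h := pv_pair seq 0 (fun x y => y == x + 1)
      simp only [List.drop_zero, show (0 + 1 : Nat) = 1 from rfl, List.drop_one,
        Nat.cast_zero] at h
      rw [h]
      rfl
    have hg : ((seq.tail.zip (seq.drop 2)).all
        (fun p => p.2 * PySem.List.pyGetD seq 0 0 == p.1 * PySem.List.pyGetD seq 1 0))
          = is_geometric seq := by
      have h := pv_pair seq 1
        (fun x y => y * PySem.List.pyGetD seq 0 0 == x * PySem.List.pyGetD seq 1 0)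
      simp only [show (1 + 1 : Nat) = 2 from rfl, List.drop_one, Nat.cast_one] at h
      rw [h]
      rfl
    by_cases hcons : is_consecutive seq = true
    · simp [pvInFams, in_families, if_neg hlen, hc, hcons]
    · by_cases hgeo : is_geometric seq = true
      · simp [pvInFams, in_families, if_neg hlen, hc, hg, hcons, hgeo]
      · have hor : ∀ x y : Bool, (x || y) = (if x = true then true else y) := by decide
        rw [Bool.not_eq_true] at hcons hgeo
        simp only [pvInFams, in_families, if_neg hlen, hc, hg, hcons, hgeo, Bool.or_self,
          Bool.false_eq_true, if_false, List.any_cons, List.any_nil, Bool.or_false]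
        rw [pvFamBranch_one, pvFamBranch_negone]
        exact hor _ _

theorem pvKidsB_eq (bound : Int) (seq : List Int) : pvKidsB bound seq = pvChildrenA bound seq := rfl

-- pvDfsB with the attach removed
theorem pvDfsB_eq (bound : Int) (seq : List Int) :
    pvDfsB bound seq =
      (if bound < PySem.List.pyGetD seq (-1) 0 then [] else
        (if 5 ≤ seq.length ∧ pvInFams seq = false then [seq] else []) ++
          (pvChildrenA bound seq).flatMap (pvDfsB bound)) := by
  rw [pvDfsB]
  simp only [List.flatMap_subtype, List.unattach_attach, pvKidsB_eq]

-- every sequence pvDfsB reports has length ≥ 5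
theorem pvDfsB_len (bound : Int) (seq : List Int) :
    ∀ s ∈ pvDfsB bound seq, 5 ≤ s.length := by
  fun_induction pvDfsB bound seq with
  | case1 => simp
  | case2 seq hb ih =>
    intro s hs
    rcases List.mem_append.mp hs with h | h
    · split at h
      · rename_i hlen
        simp only [List.mem_singleton] at h
        subst h; exact hlen.1
      · simp at h
    · obtain ⟨x, hx, hsx⟩ := List.mem_flatMap.mp h
      exact ih x s hsx

-- A's stack loop: a permutation of found ++ the hits below the stacked sequences
theorem pvLoopA_perm (bound : Int) (st found : List (List Int)) :
    (pvLoopA bound st found).Perm (found ++ st.flatMap (pvDfsB bound)) := by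
  fun_induction pvLoopA bound st found with
  | case1 found => simp
  | case2 seq rest found hb ih =>
    refine ih.trans ?_
    rw [List.flatMap_cons, pvDfsB_eq bound seq, if_pos hb]
    simp
  | case3 seq rest found hb found' ih =>
    rw [List.foldl_flip_cons_eq_append'] at ih ⊢
    refine ih.trans ?_
    rw [List.flatMap_cons, pvDfsB_eq bound seq, if_neg hb]
    have hf : found' = found ++ (if 5 ≤ seq.length ∧ pvInFams seq = false
        then [seq] else []) := by
      simp only [found', pvInFams_eq]
      split <;> simp
    rw [hf]
    simp only [List.flatMap_append, List.append_assoc]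
    refine List.Perm.append_left _ (List.Perm.append_left _ ?_)
    exact List.Perm.append_right _
      ((List.reverse_perm _).flatMap (fun _ _ => List.Perm.refl _))

-- B's suffix loop versus A's: same list
theorem pvInfB_eq_tail_aux (bound : Int) (n : Nat) : ∀ p : Int, (bound + 1 - p).toNat ≤ n →
    0 < p → pvInfB bound p = if p ≤ bound then p :: pvInfTail bound p else [] := by
  induction n with
  | zero =>
    intro p hn hp
    rw [if_neg (by omega), pvInfB, dif_neg (by omega)]
  | succ n ih =>
    intro p hn hp
    by_cases hb : p ≤ bound
    · rw [if_pos hb, pvInfB, dif_pos ⟨hp, hb⟩, pvInfTail]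
      by_cases h3 : p * 3 ≤ bound
      · rw [dif_pos ⟨hp, h3⟩, ih (p * 3) (by omega) (by omega), if_pos h3]
      · rw [dif_neg (by omega), pvInfB, dif_neg (by omega)]
    · rw [if_neg hb, pvInfB, dif_neg (by omega)]

theorem pvInfB_eq_tail (bound p : Int) (hp : 0 < p) :
    pvInfB bound p = if p ≤ bound then p :: pvInfTail bound p else [] :=
  pvInfB_eq_tail_aux bound (bound + 1 - p).toNat p le_rfl hp

-- A's prefix-set membership equals B's direct prefix comparison (for hits, which have length ≥ 5)
theorem pvFilter_eqA (bound : Int) (s : List Int) (hlen : 5 ≤ s.length) :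
    PySem.Set.contains
        (PySem.Set.ofList ((PySem.List.pyRange 5 (((pvInf bound).length : Int) + 1) 1).map
          (fun i => PySem.List.slice (pvInf bound) none (some i)))) s =
      (decide (s.length ≤ (pvInf bound).length) &&
        (s == PySem.List.slice (pvInf bound) none (some (s.length : Int)))) := by
  set inf := pvInf bound with hinf
  rw [PySem.List.slice_to_natCast]
  have hmem : ∀ (x : List Int) (l : List (List Int)),
      PySem.Set.contains (PySem.Set.ofList l) x = decide (x ∈ l) := by
    intro x l
    simp [PySem.Set.contains]
  rw [hmem]
  rcases Bool.eq_false_or_eq_true (decide (s.length ≤ inf.length) && (s == inf.take s.length))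
    with h | h
  · rw [h]
    simp only [Bool.and_eq_true, decide_eq_true_eq, beq_iff_eq] at h
    obtain ⟨h1, h2⟩ := h
    simp only [decide_eq_true_eq, List.mem_map]
    refine ⟨(s.length : Int), ?_, ?_⟩
    · rw [PySem.List.mem_pyRange_one]
      omega
    · rw [PySem.List.slice_to_natCast]
      exact h2.symm
  · rw [h]
    simp only [Bool.and_eq_false_iff, decide_eq_false_iff_not, beq_eq_false_iff_ne] at h
    simp only [decide_eq_false_iff_not, List.mem_map]
    rintro ⟨i, hi, hsi⟩
    rw [PySem.List.mem_pyRange_one] at hi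
    rw [PySem.List.slice_to inf (by omega)] at hsi
    have hlen' : s.length = i.toNat := by
      rw [← hsi]
      simp only [List.length_take]
      omega
    rcases h with h | h
    · exact h (by omega)
    · exact h (by rw [hlen']; exact hsi.symm)

theorem pvFilter_eqB (bound : Int) (s : List Int) (hlen : 5 ≤ s.length) :
    PySem.Set.contains
        (PySem.Set.ofList ((PySem.List.pyRange 5 (((pvInf bound).length : Int) + 1) 1).map
          (fun i => PySem.List.slice (pvInf bound) none (some i)))) s =
      (decide (s.length ≤ (1 :: 2 :: pvInfB bound 6 : List Int).length) &&
        (s == PySem.List.slice (1 :: 2 :: pvInfB bound 6 : List Int) none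
          (some (s.length : Int)))) := by
  by_cases h6 : (6 : Int) ≤ bound
  · have hB : (1 :: 2 :: pvInfB bound 6 : List Int) = pvInf bound := by
      rw [pvInfB_eq_tail bound 6 (by omega), if_pos h6]
      rfl
    rw [hB]
    exact pvFilter_eqA bound s hlen
  · have hT : pvInfTail bound 6 = [] := by rw [pvInfTail, dif_neg (by omega)]
    have hB : pvInfB bound 6 = [] := by rw [pvInfB, dif_neg (by omega)]
    rw [hB]
    have hlen3 : (pvInf bound).length = 3 := by simp [pvInf, hT]
    have hr : PySem.List.pyRange 5 (((pvInf bound).length : Int) + 1) 1 = [] :=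
      PySem.List.pyRange_one_eq_nil (by rw [hlen3]; norm_num)
    rw [hr]
    have hfalse : (decide (s.length ≤ ([1, 2] : List Int).length)) = false := by
      simp only [decide_eq_false_iff_not]
      simp only [List.length_cons, List.length_nil]
      omega
    rw [show ((1 :: 2 :: [] : List Int)) = ([1, 2] : List Int) from rfl, hfalse]
    simp [PySem.Set.contains, PySem.Set.ofList]

-- ===== VERDICT (by name: the statement is the Claim_ definition above) =====
theorem compute_finite_exception_maxes_spec : Claim_equal_compute_finite_exception_maxes := by
  unfold Claim_equal_compute_finite_exception_maxes
  intro bound _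
  unfold Spec_compute_finite_exception_maxes
  unfold compute_finite_exception_maxes compute_finite_exception_maxes_alt
  have hperm : (pvLoopA bound [[2, 3]] (pvLoopA bound [[1, 2]] [])).Perm
      (pvDfsB bound [1, 2] ++ pvDfsB bound [2, 3]) := by
    refine (pvLoopA_perm bound _ _).trans ?_
    simp only [List.flatMap_cons, List.flatMap_nil, List.append_nil]
    exact List.Perm.append_right _ (by simpa using pvLoopA_perm bound [[1, 2]] [])
  have hmemlen : ∀ s ∈ (pvDfsB bound [1, 2] ++ pvDfsB bound [2, 3]), 5 ≤ s.length := by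
    intro s hs
    rcases List.mem_append.mp hs with h | h
    · exact pvDfsB_len bound [1, 2] s h
    · exact pvDfsB_len bound [2, 3] s h
  have hfil : (pvDfsB bound [1, 2] ++ pvDfsB bound [2, 3]).filter
        (fun s => !(PySem.Set.contains
          (PySem.Set.ofList ((PySem.List.pyRange 5 (((pvInf bound).length : Int) + 1) 1).map
            (fun i => PySem.List.slice (pvInf bound) none (some i)))) s)) =
      (pvDfsB bound [1, 2] ++ pvDfsB bound [2, 3]).filter
        (fun s => !(decide (s.length ≤ (1 :: 2 :: pvInfB bound 6 : List Int).length) &&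
          (s == PySem.List.slice (1 :: 2 :: pvInfB bound 6 : List Int) none
            (some (s.length : Int))))) := by
    refine List.filter_congr ?_
    intro s hs
    exact congrArg Bool.not (pvFilter_eqB bound s (hmemlen s hs))
  refine PySem.List.sorted_eq_sorted_of_perm _ _ _ (fun a b h => h) ?_
  refine List.Perm.map _ ?_
  rw [← hfil]
  exact hperm.filter _
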